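-- pv_equiv track=rewrite | github.com/kagetora66/SmartSolver | smarts-fullv3.1.0.py | consolidate_by_serial
-- ===== SOURCE A (Python) =====
-- def consolidate_by_serial(smart_list):
--     consolidated = {}
--
--     for entry in smart_list:
--         serial = entry.get("Serial Number", "").strip()
--         if not serial:
--             continue  # Skip empty or malformed entries
--
--         if serial not in consolidated:
--             # Initialize with static fields
--             consolidated[serial] = {
--                 "Serial Number": serial,
--                 "Brand": entry.get("Brand", ""),
--                 "Device Model": entry.get("Device Model", ""),
--                 "Interface": entry.get("Interface", ""),
--                 "Size": entry.get("Size", "")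
--             }
--
--         param = entry.get("Parameter", "").strip()
--         raw_val = entry.get("Raw Value", "").strip()
--
--         if param:
--             consolidated[serial][param] = raw_val
--
--     return list(consolidated.values())
-- ===== SOURCE B (Python) =====
-- def consolidate_by_serial(smart_list):
--     # Two-pass: group entries by stripped serial first, then build each record.
--     groups = {}
--     for entry in smart_list:
--         serial = entry.get("Serial Number", "").strip()
--         if serial:
--             groups.setdefault(serial, []).append(entry)
--
--     result = []
--     for serial, entries in groups.items():
--         first = entries[0]
--         record = {
--             "Serial Number": serial,
--             "Brand": first.get("Brand", ""),
--             "Device Model": first.get("Device Model", ""),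
--             "Interface": first.get("Interface", ""),
--             "Size": first.get("Size", ""),
--         }
--         for e in entries:
--             param = e.get("Parameter", "").strip()
--             if param:
--                 record[param] = e.get("Raw Value", "").strip()
--         result.append(record)
--     return result
-- ===== Notes on version B (the rewrite author's own statement) =====
-- stated objective: alternative
-- what changed: Replaces A's single interleaved loop that mutates per-serial records inside one dict with a two-pass decomposition: first group entries into lists keyed by stripped serial, then build each consolidated record from its group (static fields from the first entry, parameters applied in order).
import Mathlib
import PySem

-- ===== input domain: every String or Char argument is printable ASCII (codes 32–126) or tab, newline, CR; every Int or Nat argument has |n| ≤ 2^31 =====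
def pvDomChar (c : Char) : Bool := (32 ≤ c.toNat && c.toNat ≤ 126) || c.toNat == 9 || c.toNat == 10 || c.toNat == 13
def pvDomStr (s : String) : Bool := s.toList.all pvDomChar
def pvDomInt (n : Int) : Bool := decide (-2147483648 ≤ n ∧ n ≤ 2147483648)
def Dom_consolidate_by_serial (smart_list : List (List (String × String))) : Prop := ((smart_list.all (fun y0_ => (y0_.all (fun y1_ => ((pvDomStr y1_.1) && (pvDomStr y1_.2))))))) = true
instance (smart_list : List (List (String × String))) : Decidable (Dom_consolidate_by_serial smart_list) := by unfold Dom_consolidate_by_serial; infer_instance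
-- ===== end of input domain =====

-- B replaces A's single interleaved loop by a two-pass decomposition (group by serial, then build each record); same cost, alternative structure.

-- shared helpers: entry.get(k, "") on an entry dict, entry's stripped serial,
-- the static-field record literal, and the per-entry parameter update (each
-- appears verbatim in both Pythons)
def pvGet (e : List (String × String)) (k : String) : String :=
  (PySem.Dict.mk e).getD k ""

def pvSerial (e : List (String × String)) : String :=
  PySem.Str.strip (pvGet e "Serial Number")

def pvStatic (serial : String) (e : List (String × String)) : PySem.Dict String String :=
  PySem.Dict.mk [("Serial Number", serial), ("Brand", pvGet e "Brand"),
    ("Device Model", pvGet e "Device Model"), ("Interface", pvGet e "Interface"),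
    ("Size", pvGet e "Size")]

def pvParamStep (r : PySem.Dict String String) (e : List (String × String)) : PySem.Dict String String :=
  let param := PySem.Str.strip (pvGet e "Parameter")
  if param = "" then r else r.insert param (PySem.Str.strip (pvGet e "Raw Value"))

-- ===== PORT A =====
def pvAStep (c : PySem.Dict String (PySem.Dict String String)) (entry : List (String × String)) :
    PySem.Dict String (PySem.Dict String String) :=
  let serial := pvSerial entry
  if serial = "" then c
  else
    let c1 := if c.contains serial then c else c.insert serial (pvStatic serial entry)
    let param := PySem.Str.strip (pvGet entry "Parameter")
    let rawv := PySem.Str.strip (pvGet entry "Raw Value")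
    if param = "" then c1
    else c1.modify serial PySem.Dict.empty (fun d => d.insert param rawv)

def consolidate_by_serial (smart_list : List (List (String × String))) : List (List (String × String)) :=
  ((smart_list.foldl pvAStep PySem.Dict.empty).values).map PySem.Dict.items

-- ===== PORT B =====
def pvBStep (g : PySem.Dict String (List (List (String × String)))) (entry : List (String × String)) :
    PySem.Dict String (List (List (String × String))) :=
  let serial := pvSerial entry
  if serial = "" then g
  else g.modify serial [] (fun l => l ++ [entry])

-- record of one group: static fields from the first entry, then every entry's parameter
def pvRecD (serial : String) (grp : List (List (String × String))) : PySem.Dict String String :=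
  match grp with
  | [] => PySem.Dict.empty
  | first :: _ => grp.foldl pvParamStep (pvStatic serial first)

def consolidate_by_serial_alt (smart_list : List (List (String × String))) : List (List (String × String)) :=
  ((smart_list.foldl pvBStep PySem.Dict.empty).items).map (fun p => (pvRecD p.1 p.2).items)

-- ===== PRECONDITION & SPEC =====
def Spec_consolidate_by_serial (smart_list : List (List (String × String))) (out : List (List (String × String))) : Prop := out = consolidate_by_serial_alt smart_list
instance (smart_list : List (List (String × String))) (out : List (List (String × String))) : Decidable (Spec_consolidate_by_serial smart_list out) := by unfold Spec_consolidate_by_serial; infer_instance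

-- ===== CLAIM (what is proved, stated in full; the proofs are below) =====
def Claim_equal_consolidate_by_serial : Prop := ∀ (smart_list : List (List (String × String))), Dom_consolidate_by_serial smart_list → Spec_consolidate_by_serial smart_list (consolidate_by_serial smart_list)

-- ===== LEMMAS AND PROOFS =====

-- the invariant relating A's state to B's state
def pvInv (c : PySem.Dict String (PySem.Dict String String))
    (g : PySem.Dict String (List (List (String × String)))) : Prop :=
  c.items = g.items.map (fun p => (p.1, pvRecD p.1 p.2)) ∧ (∀ p ∈ g.items, p.2 ≠ []) ∧ g.keys.Nodup

theorem pvInv_empty : pvInv PySem.Dict.empty PySem.Dict.empty := by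
  refine ⟨rfl, ?_, ?_⟩
  · intro p hp; simp [PySem.Dict.empty] at hp
  · simp [PySem.Dict.empty, PySem.Dict.keys]

theorem pvRecD_append (serial : String) (grp : List (List (String × String)))
    (h : grp ≠ []) (e : List (String × String)) :
    pvRecD serial (grp ++ [e]) = pvParamStep (pvRecD serial grp) e := by
  obtain ⟨first, rest, rfl⟩ := List.exists_cons_of_ne_nil h
  simp [pvRecD, List.foldl_append]

theorem pvInv_step (c : PySem.Dict String (PySem.Dict String String))
    (g : PySem.Dict String (List (List (String × String))))
    (e : List (String × String)) (h : pvInv c g) : pvInv (pvAStep c e) (pvBStep g e) := by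
  obtain ⟨hI, hNE, hND⟩ := h
  by_cases hs : pvSerial e = ""
  · simp only [pvAStep, pvBStep, hs, if_pos]
    exact ⟨hI, hNE, hND⟩
  have hC : c.contains (pvSerial e) = g.contains (pvSerial e) := by
    simp [PySem.Dict.contains, hI, List.any_map, Function.comp_def]
  by_cases hm : g.contains (pvSerial e) = true
  · -- serial already grouped: both sides overwrite in place
    obtain ⟨grp0, hg0⟩ : ∃ v, g.get? (pvSerial e) = some v := by
      rw [PySem.Dict.contains_eq_isSome_get?] at hm
      exact Option.isSome_iff_exists.mp hm
    have hgetD : g.getD (pvSerial e) [] = grp0 := PySem.Dict.getD_of_get?_eq_some g [] hg0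
    have hmemg : (pvSerial e, grp0) ∈ g.items := PySem.Dict.mem_items_of_get?_eq_some g hg0
    have hne0 : grp0 ≠ [] := hNE _ hmemg
    have hval : ∀ p ∈ g.items, p.1 = pvSerial e → p.2 = grp0 := by
      intro p hp hpk
      have := PySem.Dict.get?_of_mem_items g (k := p.1) (v := p.2) hp hND
      rw [hpk, hg0] at this
      exact (Option.some.injEq _ _ ▸ this.symm)
    have hB : pvBStep g e = g.insert (pvSerial e) (grp0 ++ [e]) := by
      simp [pvBStep, hs, PySem.Dict.modify, hgetD]
    have hCc : c.contains (pvSerial e) = true := hC.trans hm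
    have hgitems := PySem.Dict.items_insert_of_contains g (grp0 ++ [e]) hm
    have hmap : (g.insert (pvSerial e) (grp0 ++ [e])).items.map
        (fun p => (p.1, pvRecD p.1 p.2)) =
        g.items.map (fun p => if p.1 = pvSerial e then
          (pvSerial e, pvParamStep (pvRecD (pvSerial e) grp0) e) else (p.1, pvRecD p.1 p.2)) := by
      rw [hgitems, List.map_map]
      refine List.map_congr_left ?_
      intro p hp
      by_cases hpk : p.1 = pvSerial e
      · simp [hpk, pvRecD_append _ _ hne0]
      · simp [hpk]
    refine ⟨?_, ?_, ?_⟩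
    · -- items relation
      by_cases hp : PySem.Str.strip (pvGet e "Parameter") = ""
      · have hA : pvAStep c e = c := by
          simp [pvAStep, hs, hCc, hp]
        rw [hA, hB, hmap, hI]
        refine List.map_congr_left ?_
        intro p hp'
        by_cases hpk : p.1 = pvSerial e
        · have := hval p hp' hpk
          simp [hpk, this, pvParamStep, hp]
        · simp [hpk]
      · have hA : pvAStep c e =
            c.insert (pvSerial e) ((pvRecD (pvSerial e) grp0).insert
              (PySem.Str.strip (pvGet e "Parameter")) (PySem.Str.strip (pvGet e "Raw Value"))) := by
          have hcget : c.getD (pvSerial e) PySem.Dict.empty = pvRecD (pvSerial e) grp0 := by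
            have hmc : (pvSerial e, pvRecD (pvSerial e) grp0) ∈ c.items := by
              rw [hI]
              exact List.mem_map_of_mem hmemg
            have hndc : c.keys.Nodup := by
              simpa [PySem.Dict.keys, hI, List.map_map, Function.comp_def] using hND
            exact PySem.Dict.getD_of_get?_eq_some c _ (PySem.Dict.get?_of_mem_items c hmc hndc)
          simp [pvAStep, hs, hCc, hp, PySem.Dict.modify, hcget]
        rw [hA, hB, hmap,
          PySem.Dict.items_insert_of_contains c _ hCc, hI, List.map_map]
        refine List.map_congr_left ?_
        intro q hq
        by_cases hqk : q.1 = pvSerial e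
        · simp [hqk, pvParamStep, hp]
        · simp [hqk]
    · -- groups stay nonempty
      intro p hp
      rw [hB, hgitems] at hp
      obtain ⟨q, hq, hfq⟩ := List.mem_map.mp hp
      by_cases hqk : (q.1 == pvSerial e) = true
      · rw [if_pos hqk] at hfq
        rw [← hfq]
        simp
      · rw [if_neg hqk] at hfq
        exact hfq ▸ hNE q hq
    · -- keys stay nodup
      rw [hB, PySem.Dict.keys_insert_of_contains g _ hm]
      exact hND
  · -- fresh serial: both sides append
    have hmf : g.contains (pvSerial e) = false := by simpa using hm
    have hCc : c.contains (pvSerial e) = false := by rw [hC]; exact hmf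
    have hB : pvBStep g e = g.insert (pvSerial e) [e] := by
      simp [pvBStep, hs, PySem.Dict.modify, PySem.Dict.getD_of_not_contains g [] hmf]
    have hgitems := PySem.Dict.items_insert_of_not_contains g [e] hmf
    have hrec1 : pvRecD (pvSerial e) [e] = pvParamStep (pvStatic (pvSerial e) e) e := by
      simp [pvRecD]
    refine ⟨?_, ?_, ?_⟩
    · by_cases hp : PySem.Str.strip (pvGet e "Parameter") = ""
      · have hA : pvAStep c e = c.insert (pvSerial e) (pvStatic (pvSerial e) e) := by
          simp [pvAStep, hs, hCc, hp]
        rw [hA, hB, hgitems, PySem.Dict.items_insert_of_not_contains c _ hCc, hI, List.map_append]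
        simp [hrec1, pvParamStep, hp]
      · have hA : pvAStep c e = c.insert (pvSerial e)
            ((pvStatic (pvSerial e) e).insert (PySem.Str.strip (pvGet e "Parameter"))
              (PySem.Str.strip (pvGet e "Raw Value"))) := by
          simp [pvAStep, hs, hCc, hp, PySem.Dict.modify, PySem.Dict.getD_insert_self,
            PySem.Dict.insert_insert_self]
        rw [hA, hB, hgitems, PySem.Dict.items_insert_of_not_contains c _ hCc, hI, List.map_append]
        simp [hrec1, pvParamStep, hp]
    · intro p hp
      rw [hB, hgitems] at hp
      rcases List.mem_append.mp hp with hp' | hp'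
      · exact hNE p hp'
      · simp at hp'
        rw [hp']
        simp
    · rw [hB, PySem.Dict.keys_insert_of_not_contains g _ hmf]
      have hnk : pvSerial e ∉ g.keys := by
        intro hk
        rw [← PySem.Dict.contains_iff_mem_keys] at hk
        rw [hmf] at hk
        exact Bool.false_ne_true hk
      simp [List.nodup_append, hND]
      intro a ha hx
      exact hnk (hx ▸ ha)

theorem pvInv_foldl (l : List (List (String × String)))
    (c : PySem.Dict String (PySem.Dict String String))
    (g : PySem.Dict String (List (List (String × String))))
    (h : pvInv c g) : pvInv (l.foldl pvAStep c) (l.foldl pvBStep g) := by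
  induction l generalizing c g with
  | nil => exact h
  | cons e l ih => exact ih _ _ (pvInv_step c g e h)

-- ===== VERDICT (by name: the statement is the Claim_ definition above) =====
theorem consolidate_by_serial_spec : Claim_equal_consolidate_by_serial := by
  intro smart_list _
  unfold Spec_consolidate_by_serial consolidate_by_serial consolidate_by_serial_alt
  have h := pvInv_foldl smart_list PySem.Dict.empty PySem.Dict.empty pvInv_empty
  rw [PySem.Dict.values, h.1]
  simp
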